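-- pv_equiv track=rewrite | github.com/Hendrikjahns/AdventofCode | 2023/day1.py | get_calibration_values
-- ===== SOURCE A (Python) =====
-- def get_calibration_values(data, version):
--     num_dict = {"one": "o1e", "two": "t2o", "three": "t3e", "four": "f4r", "five": "f5e", "six": "s6x", "seven": "s7n",
--                 "eight": "e8t", "nine": "n9e"}
--     sum_cal_values = 0
--
--     for i, _ in enumerate(data):
--         if version == 2:
--             for key in num_dict.keys():
--                 data[i] = data[i].replace(key, num_dict[key])
--
--         data[i] = [int(x) for x in list(data[i]) if x.isdigit()]
--         cal_value = int(str(data[i][0]) + str(data[i][-1]))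
--         sum_cal_values += cal_value
--
--     return sum_cal_values
-- ===== SOURCE B (Python) =====
-- def get_calibration_values(data, version):
--     words = {"one": 1, "two": 2, "three": 3, "four": 4, "five": 5, "six": 6,
--              "seven": 7, "eight": 8, "nine": 9} if version == 2 else {}
--     total = 0
--     for line in data:
--         digits = []
--         for i, ch in enumerate(line):
--             if ch.isdigit():
--                 digits.append(int(ch))
--             else:
--                 for w, v in words.items():
--                     if line.startswith(w, i):
--                         digits.append(v)
--                         break
--         total += 10 * digits[0] + digits[-1]
--     return total
-- ===== Notes on version B (the rewrite author's own statement) =====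
-- stated objective: idiomatic
-- what changed: B replaces A's nine sequential whole-string replace passes and list-of-all-digits/string-concatenation with a single left-to-right scan per line that records a digit at each position where a digit character or a number word starts, combining first and last arithmetically (10*first+last); return value only - A mutates the data list in place, B does not.
import Mathlib
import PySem

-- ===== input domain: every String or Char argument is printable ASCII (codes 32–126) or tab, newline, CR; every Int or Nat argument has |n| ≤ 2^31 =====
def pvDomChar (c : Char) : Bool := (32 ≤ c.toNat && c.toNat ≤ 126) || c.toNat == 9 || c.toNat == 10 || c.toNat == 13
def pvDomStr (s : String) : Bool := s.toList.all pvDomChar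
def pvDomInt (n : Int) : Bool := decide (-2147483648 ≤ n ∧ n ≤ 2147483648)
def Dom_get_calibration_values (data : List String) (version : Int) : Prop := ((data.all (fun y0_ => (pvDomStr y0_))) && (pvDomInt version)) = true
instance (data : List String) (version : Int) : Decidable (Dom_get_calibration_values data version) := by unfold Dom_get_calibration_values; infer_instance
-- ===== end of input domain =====

-- B does one scan per line (digit characters and number-word prefixes) instead of A's nine
-- replace passes plus digit-list/string concatenation; equivalence is about the RETURN VALUE
-- only (the Python A mutates the data list in place, B does not).

-- ===== PORT A =====

-- int(x) for a single ASCII digit character x (exact on '0'..'9')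
def pvDigitVal (c : Char) : Int := (c.toNat : Int) - 48

def pvNumDict : List (String × String) :=
  [("one","o1e"),("two","t2o"),("three","t3e"),("four","f4r"),("five","f5e"),
   ("six","s6x"),("seven","s7n"),("eight","e8t"),("nine","n9e")]

-- one iteration of A's loop body: the nine replace passes (version 2), the digit
-- comprehension, then cal_value = int(str(ds[0]) + str(ds[-1])); ds[0]/ds[-1] raise
-- IndexError on a digit-free line (pyGet? = none there), excluded by Pre_ (ported .getD 0)
def pvLineCal (line : String) (version : Int) : Int :=
  let s := if version = 2 then pvNumDict.foldl (fun t kv => PySem.Str.replace t kv.1 kv.2) line else line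
  let ds := (s.toList.filter PySem.Chars.isdigit).map pvDigitVal
  (PySem.Int.ofChars? (PySem.Int.toChars ((PySem.List.pyGet? ds 0).getD 0) ++
                       PySem.Int.toChars ((PySem.List.pyGet? ds (-1)).getD 0))).getD 0

def get_calibration_values (data : List String) (version : Int) : Int :=
  data.foldl (fun acc line => acc + pvLineCal line version) 0

-- ===== PORT B =====

def pvWords : List (List Char × Int) :=
  [(['o','n','e'],1),(['t','w','o'],2),(['t','h','r','e','e'],3),(['f','o','u','r'],4),
   (['f','i','v','e'],5),(['s','i','x'],6),(['s','e','v','e','n'],7),(['e','i','g','h','t'],8),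
   (['n','i','n','e'],9)]

-- B's inner loop over positions i (= suffixes of the line): a digit char, or the first
-- word of `words` with line.startswith(w, i)
def pvScan (ws : List (List Char × Int)) : List Char → List Int
  | [] => []
  | c :: rest =>
      if PySem.Chars.isdigit c then pvDigitVal c :: pvScan ws rest
      else match ws.find? (fun wv => wv.1.isPrefixOf (c :: rest)) with
        | some wv => wv.2 :: pvScan ws rest
        | none => pvScan ws rest

def get_calibration_values_alt (data : List String) (version : Int) : Int :=
  let ws := if version = 2 then pvWords else []
  data.foldl (fun acc line =>
    let ds := pvScan ws line.toList
    acc + (10 * (PySem.List.pyGet? ds 0).getD 0 + (PySem.List.pyGet? ds (-1)).getD 0)) 0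

-- ===== PRECONDITION & SPEC =====

def pvWordStrs : List String := ["one","two","three","four","five","six","seven","eight","nine"]

-- Pre_ excludes exactly the inputs on which the Python A raises IndexError: some line with
-- no digit character that (unless version == 2 and it contains a number word) yields an
-- empty digit list.  Both Pythons raise there.
def Pre_get_calibration_values (data : List String) (version : Int) : Prop :=
  ∀ s ∈ data, (s.toList.any PySem.Chars.isdigit = true) ∨
    (version = 2 ∧ pvWordStrs.any (fun w => PySem.Str.isIn w s) = true)
instance (data : List String) (version : Int) : Decidable (Pre_get_calibration_values data version) := by
  unfold Pre_get_calibration_values; infer_instance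

def pvWitness_get_calibration_values : List String × Int := (["twone", "a1"], 2)

def Spec_get_calibration_values (data : List String) (version : Int) (out : Int) : Prop := out = get_calibration_values_alt data version
instance (data : List String) (version : Int) (out : Int) : Decidable (Spec_get_calibration_values data version out) := by unfold Spec_get_calibration_values; infer_instance

-- ===== CLAIM (what is proved, stated in full; the proofs are below) =====
def Claim_equal_get_calibration_values : Prop := ∀ (data : List String) (version : Int), Dom_get_calibration_values data version → Pre_get_calibration_values data version → Spec_get_calibration_values data version (get_calibration_values data version)

-- ===== LEMMAS AND PROOFS =====

def pvRep (a : Char) (w' r : List Char) : List Char → List Char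
  | [] => []
  | c :: t =>
      if (a :: w').isPrefixOf (c :: t) then r ++ pvRep a w' r (t.drop w'.length)
      else c :: pvRep a w' r t
termination_by s => s.length
decreasing_by all_goals (simp only [List.length_drop, List.length_cons]; omega)

theorem pv_go_inv (a : Char) (w' new : List Char) :
    ∀ (fuel : Nat) (l acc : List Char), l.length ≤ fuel →
      PySem.Chars.replace.go (a :: w') new fuel l acc = acc.reverse ++ pvRep a w' new l := by
  intro fuel
  induction fuel with
  | zero =>
      intro l acc h
      have : l = [] := by cases l <;> simp at h ⊢
      subst this; simp [PySem.Chars.replace.go, pvRep]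
  | succ n ih =>
      intro l acc h
      cases l with
      | nil => simp [PySem.Chars.replace.go, pvRep]
      | cons c t =>
          simp only [PySem.Chars.replace.go]
          by_cases hp : (a :: w').isPrefixOf (c :: t)
          · rw [if_pos hp]
            have hlen : (List.drop (a :: w').length (c :: t)).length ≤ n := by
              simp only [List.length_drop, List.length_cons] at *; omega
            rw [ih _ _ hlen]
            have : List.drop (a :: w').length (c :: t) = t.drop w'.length := by
              simp [List.length_cons]
            rw [this]
            rw [pvRep, if_pos hp]
            simp
          · rw [if_neg hp]
            have hlen : t.length ≤ n := by simp at h; omega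
            rw [ih _ _ hlen]
            rw [pvRep, if_neg hp]
            simp

theorem pvRep_eq (a : Char) (w' r : List Char) (s : List Char) :
    PySem.Chars.replace s (a :: w') r = pvRep a w' r s := by
  rw [PySem.Chars.replace]
  simp only [List.isEmpty_cons, if_false, Bool.false_eq_true]
  rw [pv_go_inv a w' r s.length s [] le_rfl]
  simp

def pvOK (a : Char) (w' : List Char) (d : Int) (dc lch : Char) (ws : List (List Char × Int)) : Bool :=
  let w := a :: w'
  let W := (w, d) :: ws
  (2 ≤ w.length : Bool)
  && (w.getLast? == some lch) && (a != lch)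
  && PySem.Chars.isdigit dc && (pvDigitVal dc == d)
  && W.all (fun u => (2 ≤ u.1.length : Bool) && u.1.all (fun c => !PySem.Chars.isdigit c))
  && W.all (fun u => (List.range u.1.length).all (fun i =>
       !(i + 2 ≤ u.1.length : Bool) || !((u.1.drop i).take 2 == w.take 2) || ((i == 0) && (u.1 == w))))
  && W.all (fun u => (List.range w.length).all (fun j =>
       (j == 0) || !(j + 2 ≤ w.length : Bool) || !(u.1.take 2 == (w.drop j).take 2)))

theorem pv_ok_len {a w' d dc lch ws} (h : pvOK a w' d dc lch ws = true) : 1 ≤ w'.length := by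
  simp [pvOK] at h; omega

theorem pv_ok_last {a w' d dc lch ws} (h : pvOK a w' d dc lch ws = true) :
    (a :: w').getLast? = some lch := by
  simp [pvOK] at h; exact h.1.1.1.1.1.1.2

theorem pv_ok_ne {a w' d dc lch ws} (h : pvOK a w' d dc lch ws = true) : a ≠ lch := by
  simp [pvOK] at h; exact h.1.1.1.1.1.2

theorem pv_ok_dc {a w' d dc lch ws} (h : pvOK a w' d dc lch ws = true) :
    PySem.Chars.isdigit dc = true := by
  simp [pvOK] at h; exact h.1.1.1.1.2

theorem pv_ok_val {a w' d dc lch ws} (h : pvOK a w' d dc lch ws = true) : pvDigitVal dc = d := by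
  simp [pvOK] at h; exact h.1.1.1.2

theorem pv_ok_letters {a w' d dc lch ws} (h : pvOK a w' d dc lch ws = true) :
    ∀ u ∈ ((a :: w', d) :: ws), 2 ≤ u.1.length ∧ ∀ c ∈ u.1, PySem.Chars.isdigit c = false := by
  simp [pvOK] at h
  have hw := h.1.1.2.1
  have hr := h.1.1.2.2
  intro u hu
  rcases List.mem_cons.mp hu with h1 | h1
  · subst h1
    refine ⟨by simp; omega, ?_⟩
    intro c hc
    rcases List.mem_cons.mp hc with rfl | hc
    · exact hw.2.1
    · exact hw.2.2 c hc
  · obtain ⟨u1, u2⟩ := u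
    exact hr u1 u2 h1

theorem pv_ok_F2 {a w' d dc lch ws} (h : pvOK a w' d dc lch ws = true) :
    ∀ u ∈ ((a :: w', d) :: ws), ∀ i, i + 2 ≤ u.1.length →
      (u.1.drop i).take 2 = (a :: w').take 2 → i = 0 ∧ u.1 = a :: w' := by
  simp [pvOK] at h
  have hw := h.1.2.1
  have hr := h.1.2.2
  intro u hu i hlen htake
  have htake' : (u.1.drop i).take 2 = a :: List.take 1 w' := by
    simpa using htake
  rcases List.mem_cons.mp hu with h1 | h1
  · subst h1
    simp only [List.length_cons] at hlen
    rcases hw i (by omega) with (h2 | h2) | h2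
    · omega
    · exact absurd htake' h2
    · exact ⟨h2, rfl⟩
  · obtain ⟨u1, u2⟩ := u
    rcases hr u1 u2 h1 i (by simp at hlen ⊢; omega) with (h2 | h2) | h2
    · simp at hlen; omega
    · exact absurd htake' h2
    · exact h2

theorem pv_ok_F3 {a w' d dc lch ws} (h : pvOK a w' d dc lch ws = true) :
    ∀ u ∈ ((a :: w', d) :: ws), ∀ j, 1 ≤ j → j + 2 ≤ (a :: w').length →
      u.1.take 2 ≠ ((a :: w').drop j).take 2 := by
  simp [pvOK] at h
  have hw := h.2.1
  have hr := h.2.2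
  intro u hu j hj hlen
  simp only [List.length_cons] at hlen
  rcases List.mem_cons.mp hu with h1 | h1
  · subst h1
    rcases hw j (by omega) with (h2 | h2) | h2
    · omega
    · omega
    · simpa using h2
  · obtain ⟨u1, u2⟩ := u
    rcases hr u1 u2 h1 j (by omega) with (h2 | h2) | h2
    · omega
    · omega
    · exact h2

theorem pvRep_prefix (a : Char) (w' : List Char) (d : Int) (dc lch : Char)
    (ws : List (List Char × Int)) (hOK : pvOK a w' d dc lch ws = true) :
    ∀ (s : List Char) (u : List Char × Int) (i : Nat), u ∈ ((a :: w', d) :: ws) →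
      (1 ≤ i ∨ u.1 ≠ a :: w') →
      (u.1.drop i).isPrefixOf (pvRep a w' [a, dc, lch] s) = (u.1.drop i).isPrefixOf s := by
  intro s
  induction s with
  | nil => intro u i hu hi; simp [pvRep]
  | cons c t ih =>
    intro u i hu hi
    by_cases hp : (a :: w').isPrefixOf (c :: t)
    · rw [pvRep, if_pos hp]
      obtain ⟨t₂, ht₂⟩ : ∃ t₂, c :: t = (a :: w') ++ t₂ := by
        rw [List.isPrefixOf_iff_prefix] at hp
        obtain ⟨t₂, h2⟩ := hp; exact ⟨t₂, h2.symm⟩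
      obtain ⟨b, w'', hw'⟩ : ∃ b w'', w' = b :: w'' := by
        cases w' with
        | nil => exact absurd (pv_ok_len hOK) (by simp)
        | cons b w'' => exact ⟨b, w'', rfl⟩
      have hca : c = a := by simpa using congrArg (fun l => l.head?) ht₂
      cases hv : u.1.drop i with
      | nil => simp
      | cons x vs =>
        cases vs with
        | nil => simp [List.isPrefixOf, hca]
        | cons y vs' =>
          have hy : y ∈ u.1 := List.mem_of_mem_drop (by rw [hv]; simp)
          have hyd : PySem.Chars.isdigit y = false := (pv_ok_letters hOK u hu).2 y hy
          have hydc : y ≠ dc := by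
            intro hcon; rw [hcon, pv_ok_dc hOK] at hyd; exact absurd hyd (by simp)
          have lhs : (x :: y :: vs').isPrefixOf (a :: dc :: lch :: pvRep a w' [a, dc, lch] (t.drop w'.length)) = false := by
            simp [List.isPrefixOf]
            intro _ hcon
            exact absurd hcon hydc
          rw [show ([a, dc, lch] ++ pvRep a w' [a, dc, lch] (List.drop w'.length t)) = (a :: dc :: lch :: pvRep a w' [a, dc, lch] (List.drop w'.length t)) from rfl, lhs]
          -- RHS is false too
          have rhs : (x :: y :: vs').isPrefixOf (c :: t) = false := by
            by_contra hcon
            have hpre : (x :: y :: vs').isPrefixOf (c :: t) = true := by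
              cases h : (x :: y :: vs').isPrefixOf (c :: t)
              · exact absurd h hcon
              · rfl
            rw [ht₂, hw'] at hpre
            simp [List.isPrefixOf] at hpre
            obtain ⟨hxa, hyb, _⟩ := hpre
            have hlen : i + 2 ≤ u.1.length := by
              have := congrArg List.length hv
              simp [List.length_drop] at this
              omega
            have htake : (u.1.drop i).take 2 = (a :: w').take 2 := by
              rw [hv, hw', hxa, hyb]; rfl
            rcases pv_ok_F2 hOK u hu i hlen htake with ⟨hi0, hu0⟩
            rcases hi with h1 | h1
            · omega
            · exact h1 hu0
          rw [rhs]
    · rw [pvRep, if_neg hp]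
      cases hv : u.1.drop i with
      | nil => simp
      | cons x vs =>
        have hdrop : u.1.drop (i + 1) = vs := by rw [← List.tail_drop, hv]; rfl
        have hih := ih u (i + 1) hu (Or.inl (by omega))
        rw [hdrop] at hih
        simp only [List.isPrefixOf, hih]

theorem pvScan_cons_digit (ws : List (List Char × Int)) (c : Char) (rest : List Char)
    (h : PySem.Chars.isdigit c = true) :
    pvScan ws (c :: rest) = pvDigitVal c :: pvScan ws rest := by
  simp [pvScan, h]

theorem pvScan_cons_found (ws : List (List Char × Int)) (c : Char) (rest : List Char)
    (wv : List Char × Int) (h : PySem.Chars.isdigit c = false)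
    (hf : ws.find? (fun wv => wv.1.isPrefixOf (c :: rest)) = some wv) :
    pvScan ws (c :: rest) = wv.2 :: pvScan ws rest := by
  simp [pvScan, h, hf]

theorem pvScan_cons_none (ws : List (List Char × Int)) (c : Char) (rest : List Char)
    (h : PySem.Chars.isdigit c = false)
    (hf : ws.find? (fun wv => wv.1.isPrefixOf (c :: rest)) = none) :
    pvScan ws (c :: rest) = pvScan ws rest := by
  simp [pvScan, h, hf]

theorem pvScan_interior (a : Char) (w' : List Char) (d : Int) (dc lch : Char)
    (ws : List (List Char × Int)) (hOK : pvOK a w' d dc lch ws = true) :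
    ∀ (k j : Nat) (t₂ : List Char), 1 ≤ j → j + k = (a :: w').length - 1 →
      pvScan ((a :: w', d) :: ws) ((a :: w').drop j ++ t₂)
        = pvScan ((a :: w', d) :: ws) (lch :: t₂) := by
  intro k
  induction k with
  | zero =>
      intro j t₂ hj hk
      have hne : (a :: w') ≠ [] := by simp
      have : (a :: w').drop j = [lch] := by
        have h1 : j = (a :: w').length - 1 := by omega
        rw [h1, List.drop_length_sub_one hne, List.getLast_of_mem_getLast? (pv_ok_last hOK)]
      rw [this]; rfl
  | succ k ih =>
      intro j t₂ hj hk
      have hjlt : j < (a :: w').length := by simp at hk ⊢; omega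
      have hj2 : j + 2 ≤ (a :: w').length := by simp at hk ⊢; omega
      have hj1lt : j + 1 < (a :: w').length := by omega
      rw [List.drop_eq_getElem_cons hjlt]
      have hmem : (a :: w')[j] ∈ (a :: w') := List.getElem_mem hjlt
      have hd : PySem.Chars.isdigit ((a :: w')[j]) = false :=
        (pv_ok_letters hOK ((a :: w', d)) (by simp)).2 _ hmem
      have hfind : ((a :: w', d) :: ws).find?
          (fun wv => wv.1.isPrefixOf ((a :: w')[j] :: ((a :: w').drop (j+1) ++ t₂))) = none := by
        rw [List.find?_eq_none]
        intro u hu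
        simp only [Bool.not_eq_true]
        by_contra hcon
        have hpre : u.1.isPrefixOf ((a :: w')[j] :: ((a :: w').drop (j+1) ++ t₂)) = true := by
          cases h : u.1.isPrefixOf ((a :: w')[j] :: ((a :: w').drop (j+1) ++ t₂))
          · exact absurd h hcon
          · rfl
        obtain ⟨u0, u1, ur, hu1⟩ : ∃ u0 u1 ur, u.1 = u0 :: u1 :: ur := by
          have := (pv_ok_letters hOK u hu).1
          cases h1 : u.1 with
          | nil => rw [h1] at this; simp at this
          | cons x xs => cases h2 : xs with
            | nil => rw [h1, h2] at this; simp at this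
            | cons y ys => exact ⟨x, y, ys, by rw [← h2]⟩
        rw [hu1] at hpre
        rw [List.drop_eq_getElem_cons hj1lt, List.isPrefixOf_iff_prefix] at hpre
        obtain ⟨r2, hr⟩ := hpre
        simp only [List.cons_append, List.cons.injEq] at hr
        have h0 : u0 = (a :: w')[j] := hr.1
        have h1' : u1 = (a :: w')[j+1] := hr.2.1
        have htk : u.1.take 2 = ((a :: w').drop j).take 2 := by
          rw [hu1, List.drop_eq_getElem_cons hjlt, List.drop_eq_getElem_cons hj1lt, h0, h1']; rfl
        exact pv_ok_F3 hOK u hu j hj hj2 htk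
      have step : pvScan ((a :: w', d) :: ws) ((a :: w')[j] :: ((a :: w').drop (j+1) ++ t₂))
          = pvScan ((a :: w', d) :: ws) ((a :: w').drop (j+1) ++ t₂) := by
        rw [pvScan, if_neg (by simp [hd]), hfind]
      rw [show ((a :: w')[j] :: (a :: w').drop (j+1)) ++ t₂
            = (a :: w')[j] :: ((a :: w').drop (j+1) ++ t₂) from rfl, step]
      exact ih (j+1) t₂ (by omega) (by omega)

theorem pv_find?_congr {α : Type} (p q : α → Bool) :
    ∀ (l : List α), (∀ x ∈ l, p x = q x) → l.find? p = l.find? q := by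
  intro l
  induction l with
  | nil => intro _; rfl
  | cons x xs ih =>
      intro h
      simp only [List.find?]
      rw [h x (by simp)]
      cases q x
      · exact ih (fun y hy => h y (by simp [hy]))
      · rfl

theorem pvScan_rep (a : Char) (w' : List Char) (d : Int) (dc lch : Char)
    (ws : List (List Char × Int)) (hOK : pvOK a w' d dc lch ws = true) :
    ∀ (s : List Char), pvScan ws (pvRep a w' [a, dc, lch] s) = pvScan ((a :: w', d) :: ws) s := by
  suffices H : ∀ (n : Nat) (s : List Char), s.length ≤ n →
      pvScan ws (pvRep a w' [a, dc, lch] s) = pvScan ((a :: w', d) :: ws) s by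
    intro s; exact H s.length s le_rfl
  intro n
  induction n with
  | zero =>
      intro s h
      have : s = [] := by cases s with | nil => rfl | cons c t => simp at h
      subst this; simp [pvRep, pvScan]
  | succ n ih =>
      intro s hs
      have hlw : ∀ u ∈ ((a :: w', d) :: ws), 2 ≤ u.1.length ∧ ∀ c ∈ u.1, PySem.Chars.isdigit c = false :=
        pv_ok_letters hOK
      have hadig : PySem.Chars.isdigit a = false := (hlw (a :: w', d) (by simp)).2 a (by simp)
      have hlchdig : PySem.Chars.isdigit lch = false := by
        have : lch ∈ (a :: w') := List.mem_of_mem_getLast? (pv_ok_last hOK)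
        exact (hlw (a :: w', d) (by simp)).2 lch this
      have hdcdig := pv_ok_dc hOK
      have hnomatch : ∀ (R : List Char) (u : List Char × Int), u ∈ ws →
          u.1.isPrefixOf (a :: dc :: R) = false := by
        intro R u hu
        obtain ⟨u0, u1, ur, hu1⟩ : ∃ u0 u1 ur, u.1 = u0 :: u1 :: ur := by
          have := (hlw u (by simp [hu])).1
          cases h1 : u.1 with
          | nil => rw [h1] at this; simp at this
          | cons x xs => cases h2 : xs with
            | nil => rw [h1, h2] at this; simp at this
            | cons y ys => exact ⟨x, y, ys, by rw [← h2]⟩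
        rw [hu1]
        have hu1d : PySem.Chars.isdigit u1 = false :=
          (hlw u (by simp [hu])).2 u1 (by rw [hu1]; simp)
        have : u1 ≠ dc := by intro hc; rw [hc, hdcdig] at hu1d; simp at hu1d
        simp [List.isPrefixOf]
        intro _ hc
        exact absurd hc this
      cases s with
      | nil => simp [pvRep, pvScan]
      | cons c t =>
        simp only [List.length_cons] at hs
        by_cases hp : (a :: w').isPrefixOf (c :: t)
        · obtain ⟨t₂, ht₂⟩ : ∃ t₂, c :: t = (a :: w') ++ t₂ := by
            rw [List.isPrefixOf_iff_prefix] at hp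
            obtain ⟨t₂, h2⟩ := hp; exact ⟨t₂, h2.symm⟩
          have hca : c = a := by simpa using congrArg (fun l => l.head?) ht₂
          have ht : t = w' ++ t₂ := by simpa [hca] using ht₂
          have hdt : t.drop w'.length = t₂ := by rw [ht]; simp
          have ht₂n : t₂.length ≤ n := by
            have := congrArg List.length ht
            simp at this; omega
          rw [pvRep, if_pos hp, hdt]
          -- LHS: scan of a :: dc :: lch :: pvRep t₂
          rw [show ([a, dc, lch] ++ pvRep a w' [a, dc, lch] t₂)
                = a :: dc :: lch :: pvRep a w' [a, dc, lch] t₂ from rfl]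
          rw [pvScan_cons_none ws a _ hadig
                (List.find?_eq_none.mpr (fun u hu => by simp [hnomatch _ u hu]))]
          rw [pvScan_cons_digit ws dc _ hdcdig, pv_ok_val hOK]
          -- RHS: the word matches at position 0
          rw [show pvScan ((a :: w', d) :: ws) (c :: t)
                = d :: pvScan ((a :: w', d) :: ws) (w' ++ t₂) from by
              rw [pvScan_cons_found _ c t (a :: w', d) (by rw [hca]; exact hadig)
                    (List.find?_cons_of_pos (by simpa using hp)), ht]]
          -- interior letters of the word match nothing
          rw [show pvScan ((a :: w', d) :: ws) (w' ++ t₂)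
                = pvScan ((a :: w', d) :: ws) (lch :: t₂) from by
              have := pvScan_interior a w' d dc lch ws hOK ((a :: w').length - 1 - 1) 1 t₂
                (by omega) (by have := pv_ok_len hOK; simp; omega)
              simpa using this]
          congr 1
          -- last letter position: matches agree via pvRep_prefix
          have hstep : ∀ u ∈ ws,
              (fun wv : List Char × Int => wv.1.isPrefixOf (lch :: pvRep a w' [a, dc, lch] t₂)) u
                = (fun wv : List Char × Int => wv.1.isPrefixOf (lch :: t₂)) u := by
            intro u hu
            obtain ⟨u0, urest, hu1⟩ : ∃ u0 urest, u.1 = u0 :: urest := by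
              have := (hlw u (by simp [hu])).1
              cases h1 : u.1 with
              | nil => rw [h1] at this; simp at this
              | cons x xs => exact ⟨x, xs, rfl⟩
            have hM := pvRep_prefix a w' d dc lch ws hOK t₂ u 1 (by simp [hu]) (Or.inl le_rfl)
            have hur : u.1.drop 1 = urest := by rw [hu1]; rfl
            rw [hur] at hM
            simp only [hu1, List.isPrefixOf, hM]
          have hfL : ws.find? (fun wv => wv.1.isPrefixOf (lch :: pvRep a w' [a, dc, lch] t₂))
              = ws.find? (fun wv => wv.1.isPrefixOf (lch :: t₂)) := pv_find?_congr _ _ ws hstep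
          have hfR : ((a :: w', d) :: ws).find? (fun wv => wv.1.isPrefixOf (lch :: t₂))
              = ws.find? (fun wv => wv.1.isPrefixOf (lch :: t₂)) := by
            apply List.find?_cons_of_neg
            have hne : (a == lch) = false := by
              simpa using pv_ok_ne hOK
            simp [List.isPrefixOf, hne]
          cases hfind : ws.find? (fun wv => wv.1.isPrefixOf (lch :: t₂)) with
          | some wv =>
              rw [pvScan_cons_found ws lch _ wv hlchdig (hfL.trans hfind),
                  pvScan_cons_found _ lch t₂ wv hlchdig (hfR.trans hfind), ih t₂ ht₂n]
          | none =>
              rw [pvScan_cons_none ws lch _ hlchdig (hfL.trans hfind),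
                  pvScan_cons_none _ lch t₂ hlchdig (hfR.trans hfind), ih t₂ ht₂n]
        · rw [pvRep, if_neg hp]
          have htn : t.length ≤ n := by omega
          cases hc : PySem.Chars.isdigit c with
          | true =>
              rw [pvScan_cons_digit ws c _ hc, pvScan_cons_digit _ c t hc, ih t htn]
          | false =>
              have hstep : ∀ u ∈ ws,
                  (fun wv : List Char × Int => wv.1.isPrefixOf (c :: pvRep a w' [a, dc, lch] t)) u
                    = (fun wv : List Char × Int => wv.1.isPrefixOf (c :: t)) u := by
                intro u hu
                obtain ⟨u0, urest, hu1⟩ : ∃ u0 urest, u.1 = u0 :: urest := by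
                  have := (hlw u (by simp [hu])).1
                  cases h1 : u.1 with
                  | nil => rw [h1] at this; simp at this
                  | cons x xs => exact ⟨x, xs, rfl⟩
                have hM := pvRep_prefix a w' d dc lch ws hOK t u 1 (by simp [hu]) (Or.inl le_rfl)
                have hur : u.1.drop 1 = urest := by rw [hu1]; rfl
                rw [hur] at hM
                simp only [hu1, List.isPrefixOf, hM]
              have hfL : ws.find? (fun wv => wv.1.isPrefixOf (c :: pvRep a w' [a, dc, lch] t))
                  = ws.find? (fun wv => wv.1.isPrefixOf (c :: t)) := pv_find?_congr _ _ ws hstep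
              have hfR : ((a :: w', d) :: ws).find? (fun wv => wv.1.isPrefixOf (c :: t))
                  = ws.find? (fun wv => wv.1.isPrefixOf (c :: t)) :=
                List.find?_cons_of_neg (by simpa using hp)
              cases hfind : ws.find? (fun wv => wv.1.isPrefixOf (c :: t)) with
              | some wv =>
                  rw [pvScan_cons_found ws c _ wv hc (hfL.trans hfind),
                      pvScan_cons_found _ c t wv hc (hfR.trans hfind), ih t htn]
              | none =>
                  rw [pvScan_cons_none ws c _ hc (hfL.trans hfind),
                      pvScan_cons_none _ c t hc (hfR.trans hfind), ih t htn]

theorem pvScan_nil_words (s : List Char) :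
    pvScan [] s = (s.filter PySem.Chars.isdigit).map pvDigitVal := by
  induction s with
  | nil => rfl
  | cons c t ih =>
      cases hc : PySem.Chars.isdigit c with
      | true => rw [pvScan_cons_digit [] c t hc]; simp [List.filter, hc, ih]
      | false => rw [pvScan_cons_none [] c t hc rfl]; simp [List.filter, hc, ih]

theorem pvChain (x : List Char) :
    pvScan []
      (pvRep 'n' ['i','n','e'] ['n','9','e']
        (pvRep 'e' ['i','g','h','t'] ['e','8','t']
          (pvRep 's' ['e','v','e','n'] ['s','7','n']
            (pvRep 's' ['i','x'] ['s','6','x']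
              (pvRep 'f' ['i','v','e'] ['f','5','e']
                (pvRep 'f' ['o','u','r'] ['f','4','r']
                  (pvRep 't' ['h','r','e','e'] ['t','3','e']
                    (pvRep 't' ['w','o'] ['t','2','o']
                      (pvRep 'o' ['n','e'] ['o','1','e'] x))))))))) = pvScan pvWords x := by
  rw [pvScan_rep 'n' ['i','n','e'] 9 '9' 'e' [] (by decide)]
  rw [pvScan_rep 'e' ['i','g','h','t'] 8 '8' 't' _ (by decide)]
  rw [pvScan_rep 's' ['e','v','e','n'] 7 '7' 'n' _ (by decide)]
  rw [pvScan_rep 's' ['i','x'] 6 '6' 'x' _ (by decide)]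
  rw [pvScan_rep 'f' ['i','v','e'] 5 '5' 'e' _ (by decide)]
  rw [pvScan_rep 'f' ['o','u','r'] 4 '4' 'r' _ (by decide)]
  rw [pvScan_rep 't' ['h','r','e','e'] 3 '3' 'e' _ (by decide)]
  rw [pvScan_rep 't' ['w','o'] 2 '2' 'o' _ (by decide)]
  rw [pvScan_rep 'o' ['n','e'] 1 '1' 'e' _ (by decide)]
  rfl

theorem pvDigits_eq (line : String) (version : Int) :
    ((if version = 2 then pvNumDict.foldl (fun t kv => PySem.Str.replace t kv.1 kv.2) line else line).toList.filter
        PySem.Chars.isdigit).map pvDigitVal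
      = pvScan (if version = 2 then pvWords else []) line.toList := by
  by_cases hv : version = 2
  · rw [if_pos hv, if_pos hv, ← pvScan_nil_words]
    simp only [pvNumDict, List.foldl]
    simp only [PySem.Str.toList_replace]
    rw [show ("one".toList) = 'o' :: ['n','e'] from rfl,
        show ("o1e".toList) = ['o','1','e'] from rfl,
        show ("two".toList) = 't' :: ['w','o'] from rfl,
        show ("t2o".toList) = ['t','2','o'] from rfl,
        show ("three".toList) = 't' :: ['h','r','e','e'] from rfl,
        show ("t3e".toList) = ['t','3','e'] from rfl,
        show ("four".toList) = 'f' :: ['o','u','r'] from rfl,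
        show ("f4r".toList) = ['f','4','r'] from rfl,
        show ("five".toList) = 'f' :: ['i','v','e'] from rfl,
        show ("f5e".toList) = ['f','5','e'] from rfl,
        show ("six".toList) = 's' :: ['i','x'] from rfl,
        show ("s6x".toList) = ['s','6','x'] from rfl,
        show ("seven".toList) = 's' :: ['e','v','e','n'] from rfl,
        show ("s7n".toList) = ['s','7','n'] from rfl,
        show ("eight".toList) = 'e' :: ['i','g','h','t'] from rfl,
        show ("e8t".toList) = ['e','8','t'] from rfl,
        show ("nine".toList) = 'n' :: ['i','n','e'] from rfl,
        show ("n9e".toList) = ['n','9','e'] from rfl]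
    rw [pvRep_eq, pvRep_eq, pvRep_eq, pvRep_eq, pvRep_eq, pvRep_eq, pvRep_eq, pvRep_eq, pvRep_eq]
    exact pvChain line.toList
  · rw [if_neg hv, if_neg hv, ← pvScan_nil_words]

theorem pvScan_bounds (ws : List (List Char × Int)) (hws : ∀ wv ∈ ws, 0 ≤ wv.2 ∧ wv.2 ≤ 9) :
    ∀ (s : List Char), ∀ x ∈ pvScan ws s, 0 ≤ x ∧ x ≤ 9 := by
  intro s
  induction s with
  | nil => intro x hx; simp [pvScan] at hx
  | cons c t ih =>
      intro x hx
      cases hc : PySem.Chars.isdigit c with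
      | true =>
          rw [pvScan_cons_digit ws c t hc] at hx
          rcases List.mem_cons.mp hx with h1 | h1
          · subst h1
            have h2 : ('0' ≤ c) ∧ (c ≤ '9') := by
              have := hc
              unfold PySem.Chars.isdigit at this
              simpa using this
            have h3 : 48 ≤ c.toNat ∧ c.toNat ≤ 57 := by
              have l1 : '0'.toNat ≤ c.toNat := by
                have := h2.1
                rw [Char.le_def] at this
                exact this
              have l2 : c.toNat ≤ '9'.toNat := by
                have := h2.2
                rw [Char.le_def] at this
                exact this
              exact ⟨l1, l2⟩
            unfold pvDigitVal
            omega
          · exact ih x h1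
      | false =>
          rw [pvScan] at hx
          rw [hc] at hx
          simp only [Bool.false_eq_true, if_false] at hx
          cases hfind : ws.find? (fun wv => wv.1.isPrefixOf (c :: t)) with
          | some wv =>
              rw [hfind] at hx
              simp only at hx
              rcases List.mem_cons.mp hx with h1 | h1
              · subst h1
                exact hws wv (List.mem_of_find?_eq_some hfind)
              · exact ih x h1
          | none =>
              rw [hfind] at hx
              exact ih x hx

theorem pvTwoDigit (x y : Int) (hx0 : 0 ≤ x) (hx9 : x ≤ 9) (hy0 : 0 ≤ y) (hy9 : y ≤ 9) :
    (PySem.Int.ofChars? (PySem.Int.toChars x ++ PySem.Int.toChars y)).getD 0 = 10 * x + y := by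
  interval_cases x <;> interval_cases y <;> decide

theorem pvGetNeg1 (x : Int) (xs : List Int) :
    PySem.List.pyGet? (x :: xs) (-1) = (x :: xs).getLast? := by
  simp [PySem.List.pyGet?, PySem.List.pyIdx?]
  rw [List.getLast?_eq_getElem?]
  simp

theorem pvLine_eq (line : String) (version : Int) :
    pvLineCal line version =
      10 * (PySem.List.pyGet? (pvScan (if version = 2 then pvWords else []) line.toList) 0).getD 0
        + (PySem.List.pyGet? (pvScan (if version = 2 then pvWords else []) line.toList) (-1)).getD 0 := by
  unfold pvLineCal
  simp only []
  rw [pvDigits_eq]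
  have hb : ∀ x ∈ pvScan (if version = 2 then pvWords else []) line.toList, 0 ≤ x ∧ x ≤ 9 := by
    apply pvScan_bounds
    split
    · decide
    · decide
  cases hd : pvScan (if version = 2 then pvWords else []) line.toList with
  | nil => decide
  | cons h tl =>
      have h0 : PySem.List.pyGet? (h :: tl) 0 = some h := by
        simp [PySem.List.pyGet?, PySem.List.pyIdx?]
      have hlast : (h :: tl).getLast? = some ((h :: tl).getLast (by simp)) :=
        List.getLast?_eq_some_getLast (by simp)
      rw [h0, pvGetNeg1, hlast]
      simp only [Option.getD_some]
      have hh := hb h (by rw [hd]; simp)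
      have hl := hb ((h :: tl).getLast (by simp)) (by rw [hd]; exact List.getLast_mem _)
      exact pvTwoDigit _ _ hh.1 hh.2 hl.1 hl.2

theorem pvMain (data : List String) (version : Int) :
    get_calibration_values data version = get_calibration_values_alt data version := by
  unfold get_calibration_values get_calibration_values_alt
  simp only []
  suffices H : ∀ (l : List String) (acc : Int),
      l.foldl (fun acc line => acc + pvLineCal line version) acc
        = l.foldl (fun acc line =>
            acc + (10 * (PySem.List.pyGet? (pvScan (if version = 2 then pvWords else []) line.toList) 0).getD 0
              + (PySem.List.pyGet? (pvScan (if version = 2 then pvWords else []) line.toList) (-1)).getD 0)) acc by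
    exact H data 0
  intro l
  induction l with
  | nil => intro acc; rfl
  | cons x xs ih =>
      intro acc
      simp only [List.foldl]
      rw [pvLine_eq, ih]

-- ===== VERDICT (by name: the statement is the Claim_ definition above) =====
theorem get_calibration_values_spec : Claim_equal_get_calibration_values := by
  intro data version _ _
  unfold Spec_get_calibration_values
  exact pvMain data version
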